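-- pv_equiv track=rewrite | github.com/thiagopelizoni/ProjectEuler | src/problem_057.py | answer
-- ===== SOURCE A (Python) =====
-- def answer(iterations):
--     numerator, denominator = 3, 2
--     count = 0
--     for _ in range(1, iterations):
--         numerator, denominator = numerator + 2 * denominator, numerator + denominator
--         if len(str(numerator)) > len(str(denominator)):
--             count += 1
--     return count
-- ===== SOURCE B (Python) =====
-- def answer(iterations):
--     # Stage 1: build only the denominator sequence q_0..q_iterations
--     # (q_0=1, q_1=2, q_n = 2*q_{n-1} + q_{n-2}); numerators are p_n = q_n + q_{n-1}.
--     qs = [1, 2]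
--     for _ in range(iterations - 1):
--         qs.append(2 * qs[-1] + qs[-2])
--     # Stage 2: count the later convergents whose numerator has more digits.
--     return sum(1 for prev, cur in zip(qs[1:], qs[2:])
--                if len(str(cur + prev)) > len(str(cur)))
-- ===== Notes on version B (the rewrite author's own statement) =====
-- stated objective: alternative
-- what changed: Replaces A's single coupled loop (numerator, denominator, count updated together) by two staged passes: first build only the denominator sequence q_n = 2*q_{n-1} + q_{n-2} as a list, then count by zipping adjacent denominators and forming each numerator as q_n + q_{n-1}, using p_n = q_n + q_{n-1}.
import Mathlib
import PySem

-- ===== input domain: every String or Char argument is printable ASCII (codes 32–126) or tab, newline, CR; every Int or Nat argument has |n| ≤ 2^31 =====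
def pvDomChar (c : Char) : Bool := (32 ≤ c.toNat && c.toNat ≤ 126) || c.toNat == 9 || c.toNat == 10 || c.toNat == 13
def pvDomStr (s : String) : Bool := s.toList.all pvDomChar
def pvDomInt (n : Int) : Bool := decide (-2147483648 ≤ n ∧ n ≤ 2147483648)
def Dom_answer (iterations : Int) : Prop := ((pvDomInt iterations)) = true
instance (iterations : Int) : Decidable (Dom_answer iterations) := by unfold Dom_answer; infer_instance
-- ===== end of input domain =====

-- B splits A's coupled loop into two staged passes: build the denominator list
-- q_n = 2*q_{n-1} + q_{n-2}, then count via zip using p_n = q_n + q_{n-1}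
-- (objective: alternative decomposition, same cost).

-- ===== PORT A =====
-- loop body of A: state (numerator, denominator, count)
def answerStepA (st : Int × Int × Int) (_ : Int) : Int × Int × Int :=
  let numerator := st.1 + 2 * st.2.1
  let denominator := st.1 + st.2.1
  (numerator, denominator,
    if PySem.Str.len (PySem.Int.toStr numerator) > PySem.Str.len (PySem.Int.toStr denominator)
    then st.2.2 + 1 else st.2.2)

def answer (iterations : Int) : Int :=
  ((PySem.List.pyRange 1 iterations 1).foldl answerStepA (3, 2, 0)).2.2

-- ===== PORT B =====
-- stage 1 loop body: qs.append(2*qs[-1] + qs[-2]); qs always has ≥ 2 elements,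
-- so the pyGetD defaults are never used (exact)
def answerGrow (qs : List Int) (_ : Int) : List Int :=
  qs ++ [2 * PySem.List.pyGetD qs (-1) 0 + PySem.List.pyGetD qs (-2) 0]

-- the summand of stage 2's generator: (prev, cur) ↦ 1 or 0
def answerTerm (pc : Int × Int) : Int :=
  if PySem.Str.len (PySem.Int.toStr (pc.2 + pc.1)) > PySem.Str.len (PySem.Int.toStr pc.2)
  then 1 else 0

def answer_alt (iterations : Int) : Int :=
  let qs := (PySem.List.pyRange 0 (iterations - 1) 1).foldl answerGrow [1, 2]
  (((PySem.List.slice qs (some 1) none).zip (PySem.List.slice qs (some 2) none)).map answerTerm).sum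

-- ===== PRECONDITION & SPEC =====
def Spec_answer (iterations : Int) (out : Int) : Prop := out = answer_alt iterations
instance (iterations : Int) (out : Int) : Decidable (Spec_answer iterations out) := by unfold Spec_answer; infer_instance

-- ===== CLAIM (what is proved, stated in full; the proofs are below) =====
def Claim_equal_answer : Prop := ∀ (iterations : Int), Dom_answer iterations → Spec_answer iterations (answer iterations)

-- ===== LEMMAS AND PROOFS =====

-- B's stage-2 count written on tails: pvS l = sum of answerTerm over zip(l[1:], l[2:])
def pvS (l : List Int) : Int := ((l.tail.zip (l.drop 2)).map answerTerm).sum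

-- the two loop bodies ignore the range element, so the folds are iterates
def pvIterA (n : Nat) : Int × Int × Int := (fun st => answerStepA st 0)^[n] (3, 2, 0)
def pvIterB (n : Nat) : List Int := (fun qs => answerGrow qs 0)^[n] [1, 2]

theorem pv_foldA (l : List Int) : ∀ s, l.foldl answerStepA s = (fun st => answerStepA st 0)^[l.length] s := by
  induction l with
  | nil => intro s; simp
  | cons x xs ih =>
    intro s
    have hx : answerStepA s x = answerStepA s 0 := rfl
    simp [List.foldl, hx, ih, Function.iterate_succ_apply]

theorem pv_foldB (l : List Int) : ∀ s, l.foldl answerGrow s = (fun qs => answerGrow qs 0)^[l.length] s := by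
  induction l with
  | nil => intro s; simp
  | cons x xs ih =>
    intro s
    have hx : answerGrow s x = answerGrow s 0 := rfl
    simp [List.foldl, hx, ih, Function.iterate_succ_apply]

-- zipping a snoc list with its own tail appends one pair (last, new element)
theorem pv_zip_tail_snoc (m : List Int) (hm : m ≠ []) (c : Int) :
    (m ++ [c]).zip ((m ++ [c]).tail) = m.zip m.tail ++ [(m.getLast hm, c)] := by
  induction m with
  | nil => exact absurd rfl hm
  | cons a m' ih =>
    cases m' with
    | nil => simp
    | cons b m'' =>
      have h := ih (by simp)
      simp only [List.cons_append, List.tail_cons, List.zip_cons_cons] at h ⊢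
      rw [h]
      simp

theorem pv_S_snoc (l : List Int) (a b c : Int) :
    pvS (l ++ [a, b, c]) = pvS (l ++ [a, b]) + answerTerm (b, c) := by
  have h1 : l ++ [a, b, c] = (l ++ [a, b]) ++ [c] := by simp
  have hne : (l ++ [a, b]).tail ≠ [] := by cases l <;> simp
  have htail : ((l ++ [a, b]) ++ [c]).tail = (l ++ [a, b]).tail ++ [c] := by
    cases l <;> simp
  have hlast : ((l ++ [a, b]).tail).getLast hne = b := by
    cases l with
    | nil => simp
    | cons x xs => simp [List.tail_cons]
  have hdrop2 : ∀ (m : List Int), m.drop 2 = m.tail.tail := by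
    intro m; cases m with
    | nil => rfl
    | cons x t => cases t <;> rfl
  unfold pvS
  rw [h1, hdrop2, hdrop2, htail]
  rw [pv_zip_tail_snoc _ hne c, hlast]
  simp

-- main invariant: after n steps, B's list ends in [a, b] and A's state is (a+b, b, pvS of the list)
theorem pv_invariant (n : Nat) :
    ∃ (l : List Int) (a b : Int),
      pvIterB n = l ++ [a, b] ∧ pvIterA n = (a + b, b, pvS (l ++ [a, b])) := by
  induction n with
  | zero => exact ⟨[], 1, 2, rfl, by norm_num [pvIterA, pvS]⟩
  | succ k ih =>
    obtain ⟨l, a, b, hB, hA⟩ := ih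
    refine ⟨l ++ [a], b, 2 * b + a, ?_, ?_⟩
    · rw [pvIterB, Function.iterate_succ_apply', ← pvIterB, hB]
      have h1 : PySem.List.pyGetD (l ++ [a, b]) (-1) 0 = b := by
        have h : l ++ [a, b] = (l ++ [a]) ++ [b] := by simp
        rw [h, PySem.List.pyGetD_neg_one_append_singleton]
      have h2 : PySem.List.pyGetD (l ++ [a, b]) (-2) 0 = a := by
        rw [PySem.List.pyGetD_neg_ofNat (l ++ [a, b]) 2 0 (by omega) (by simp)]
        simp
      simp [answerGrow, h1, h2]
    · rw [pvIterA, Function.iterate_succ_apply', ← pvIterA, hA]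
      have hS : pvS ((l ++ [a]) ++ [b, 2 * b + a]) = pvS (l ++ [a, b]) + answerTerm (b, 2 * b + a) := by
        have h : (l ++ [a]) ++ [b, 2 * b + a] = l ++ [a, b, 2 * b + a] := by simp
        rw [h, pv_S_snoc]
      rw [hS]
      unfold answerStepA answerTerm
      have e1 : a + b + 2 * (b : Int) = 2 * b + a + b := by ring
      have e2 : a + b + (b : Int) = 2 * b + a := by ring
      simp only [e1, e2]
      split_ifs with h <;> simp <;> ring

-- ===== VERDICT (by name: the statement is the Claim_ definition above) =====
theorem answer_spec : Claim_equal_answer := by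
  intro iterations _
  unfold Spec_answer answer answer_alt
  rw [pv_foldA, pv_foldB]
  simp only [PySem.List.length_pyRange_one, Int.sub_zero]
  obtain ⟨l, a, b, hB, hA⟩ := pv_invariant (iterations - 1).toNat
  rw [pvIterA, pvIterB] at *
  rw [hA, hB]
  have h2 : PySem.List.slice (l ++ [a, b]) (some 2) none = (l ++ [a, b]).drop 2 := by
    simp [pysem]
  rw [PySem.List.slice_from_one, h2]
  rfl
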